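-- pv_equiv track=rewrite | github.com/alexaquila/alignfree | alignfree/spectracalculator.py | shrinkMultipleKmers
-- ===== SOURCE A (Python) =====
-- def shrinkMultipleKmers(spectrum):
--     shrinkedSpectrum = []
--     shrinkedSpectrum.append(spectrum[0])
--     for kmer in spectrum[1:]:
--         if shrinkedSpectrum[-1][0] == kmer[0]:
--             shrinkedSpectrum[-1] = kmer[0], kmer[1]+shrinkedSpectrum[-1][1]
--         else:
--             shrinkedSpectrum.append(kmer)
--     return shrinkedSpectrum
-- ===== SOURCE B (Python) =====
-- def shrinkMultipleKmers(spectrum):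
--     # Two-pointer group-then-reduce: scan each run of equal keys, emit (key, run sum).
--     out = []
--     i = 0
--     n = len(spectrum)
--     while i < n:
--         key = spectrum[i][0]
--         total = spectrum[i][1]
--         j = i + 1
--         while j < n and spectrum[j][0] == key:
--             total += spectrum[j][1]
--             j += 1
--         out.append((key, total))
--         i = j
--     return out
-- ===== Notes on version B (the rewrite author's own statement) =====
-- stated objective: alternative
-- what changed: Replaced A's running last-element accumulator (read/overwrite the last appended entry) with a two-pointer run scanner that sums each maximal run of equal keys and appends once per run.
import Mathlib
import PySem

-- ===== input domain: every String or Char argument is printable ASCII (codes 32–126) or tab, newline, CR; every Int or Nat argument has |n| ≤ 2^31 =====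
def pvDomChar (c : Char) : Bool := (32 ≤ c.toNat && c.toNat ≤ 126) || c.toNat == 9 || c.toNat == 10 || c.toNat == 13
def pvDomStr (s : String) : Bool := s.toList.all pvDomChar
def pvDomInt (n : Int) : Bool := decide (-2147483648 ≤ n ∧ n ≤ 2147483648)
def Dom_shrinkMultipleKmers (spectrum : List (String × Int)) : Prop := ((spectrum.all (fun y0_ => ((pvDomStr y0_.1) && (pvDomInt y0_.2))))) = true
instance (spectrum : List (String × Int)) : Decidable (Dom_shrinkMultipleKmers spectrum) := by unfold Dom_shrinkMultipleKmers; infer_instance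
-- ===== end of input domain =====

-- B replaces A's last-element-overwrite accumulator with a two-pointer run scanner
-- that sums each maximal run of equal keys (alternative decomposition, same cost).


-- ===== PORT A =====
-- one loop step: read shrinkedSpectrum[-1], overwrite it or append
def shrinkStepA (acc : List (String × Int)) (kmer : String × Int) : List (String × Int) :=
  match acc.getLast? with
  | some last =>
      if last.1 == kmer.1 then acc.dropLast ++ [(kmer.1, kmer.2 + last.2)]
      else acc ++ [kmer]
  | none => acc ++ [kmer]   -- unreachable: acc starts with one element and never shrinks to []

def shrinkMultipleKmers (spectrum : List (String × Int)) : List (String × Int) :=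
  match spectrum with
  | [] => []                 -- Python raises IndexError here; excluded by Pre_
  | x :: rest => rest.foldl shrinkStepA [x]

-- ===== PORT B =====
-- inner while loop: consume the run of entries whose key equals `key`, accumulating `total`
def runScanB (key : String) (total : Int) : List (String × Int) → Int × List (String × Int)
  | [] => (total, [])
  | (k, v) :: rest => if k == key then runScanB key (total + v) rest else (total, (k, v) :: rest)

theorem runScanB_len_le (key : String) (total : Int) :
    ∀ l : List (String × Int), (runScanB key total l).2.length ≤ l.length := by
  intro l
  induction l generalizing total with
  | nil => simp [runScanB]
  | cons p rest ih =>
    obtain ⟨k, v⟩ := p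
    simp only [runScanB]
    split
    · exact le_trans (ih _) (by simp)
    · simp

def shrinkMultipleKmers_alt : List (String × Int) → List (String × Int)
  | [] => []
  | (k, v) :: rest =>
      let t := runScanB k v rest
      (k, t.1) :: shrinkMultipleKmers_alt t.2
  termination_by l => l.length
  decreasing_by
    simpa using Nat.lt_succ_of_le (runScanB_len_le k v rest)

-- ===== PRECONDITION & SPEC =====
-- Pre_ excludes only the empty list, on which Python A raises IndexError (spectrum[0]).
def Pre_shrinkMultipleKmers (spectrum : List (String × Int)) : Prop := spectrum ≠ []
instance (spectrum : List (String × Int)) : Decidable (Pre_shrinkMultipleKmers spectrum) := by unfold Pre_shrinkMultipleKmers; infer_instance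
def pvWitness_shrinkMultipleKmers : (List (String × Int)) := [("ab", 2), ("ab", 3), ("c", 1)]

def Spec_shrinkMultipleKmers (spectrum : List (String × Int)) (out : List (String × Int)) : Prop := out = shrinkMultipleKmers_alt spectrum
instance (spectrum : List (String × Int)) (out : List (String × Int)) : Decidable (Spec_shrinkMultipleKmers spectrum out) := by unfold Spec_shrinkMultipleKmers; infer_instance

-- ===== CLAIM (what is proved, stated in full; the proofs are below) =====
def Claim_equal_shrinkMultipleKmers : Prop := ∀ (spectrum : List (String × Int)), Dom_shrinkMultipleKmers spectrum → Pre_shrinkMultipleKmers spectrum → Spec_shrinkMultipleKmers spectrum (shrinkMultipleKmers spectrum)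

-- ===== LEMMAS AND PROOFS =====

-- Main invariant: feeding A's loop from state `pre ++ [(k, v)]` equals `pre` followed by B's
-- run output for the current open run (k, v) and B's processing of the remainder.
theorem foldl_shrinkStepA_eq (rest : List (String × Int)) :
    ∀ (pre : List (String × Int)) (k : String) (v : Int),
      rest.foldl shrinkStepA (pre ++ [(k, v)]) =
        pre ++ ((k, (runScanB k v rest).1) :: shrinkMultipleKmers_alt (runScanB k v rest).2) := by
  induction rest with
  | nil =>
    intro pre k v
    simp [runScanB, shrinkMultipleKmers_alt]
  | cons p rest ih =>
    intro pre k v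
    obtain ⟨k', v'⟩ := p
    by_cases hk : k = k'
    · subst hk
      have hstep : shrinkStepA (pre ++ [(k, v)]) (k, v') = pre ++ [(k, v' + v)] := by
        simp [shrinkStepA]
      have hvv : v' + v = v + v' := by ring
      simp only [List.foldl_cons, hstep, runScanB, beq_self_eq_true, if_true, hvv]
      exact ih pre k (v + v')
    · have hk' : (k == k') = false := by simpa using hk
      have hk'' : (k' == k) = false := by simpa using (Ne.symm hk)
      have hstep : shrinkStepA (pre ++ [(k, v)]) (k', v') = (pre ++ [(k, v)]) ++ [(k', v')] := by
        simp [shrinkStepA, hk']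
      simp only [List.foldl_cons, hstep, runScanB, hk'', Bool.false_eq_true, if_false]
      rw [ih (pre ++ [(k, v)]) k' v']
      simp [shrinkMultipleKmers_alt]

-- ===== VERDICT (by name: the statement is the Claim_ definition above) =====
theorem shrinkMultipleKmers_spec : Claim_equal_shrinkMultipleKmers := by
  intro spectrum _ hpre
  unfold Spec_shrinkMultipleKmers
  match spectrum with
  | [] => exact absurd rfl hpre
  | (k, v) :: rest =>
    show rest.foldl shrinkStepA ([] ++ [(k, v)]) = _
    rw [foldl_shrinkStepA_eq rest [] k v]
    simp [shrinkMultipleKmers_alt]
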